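-- pv_equiv track=rewrite | github.com/mjoehler94/adventOfCode | 2019/day4.py | solve_puzzle2
-- ===== SOURCE A (Python) =====
-- def solve_puzzle2(input_values):
--     solution_counter = 0
--     for num in range(input_values[0], input_values[1]):
--         # initialize conditions
--         is_double = False
--         is_non_decreasing = True
--         # convert to string for checking
--         num_as_string = str(num)
--         for i in range(len(num_as_string) - 1):
--             # this section is adjusted with the new info we have (only had to add one extra condition)
--             # the added condition works because we know the digits are non-decreasing
--             if num_as_string[i] == num_as_string[i + 1] and num_as_string.count(num_as_string[i]) == 2:
--                 is_double = True
--             if int(num_as_string[i]) > int(num_as_string[i + 1]):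
--                 is_non_decreasing = False
--         if is_double and is_non_decreasing:
--             solution_counter += 1
--
--     return solution_counter
-- ===== SOURCE B (Python) =====
-- def solve_puzzle2(input_values):
--     total = 0
--     for num in range(input_values[0], input_values[1]):
--         counts = [0] * 10
--         prev = num % 10
--         counts[prev] += 1
--         n = num // 10
--         nondec = True
--         while n > 0:
--             d = n % 10
--             if d > prev:
--                 nondec = False
--             counts[d] += 1
--             prev = d
--             n //= 10
--         if nondec and 2 in counts:
--             total += 1
--     return total
-- ===== Notes on version B (the rewrite author's own statement) =====
-- stated objective: alternative
-- what changed: B checks each number arithmetically in one right-to-left divmod pass with a 10-slot digit-count table (non-decreasing iff each higher digit <= the lower one; exact double iff some count equals 2), replacing A's string conversion, index loop, per-position str.count scans and per-character int() parses.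
-- outside the precondition, e.g. on solve_puzzle2([0]): A raises IndexError, B raises IndexError; on solve_puzzle2([1]): A raises IndexError, B raises IndexError; on solve_puzzle2([-1, 25]): A raises ValueError, B returns 2
import Mathlib
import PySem

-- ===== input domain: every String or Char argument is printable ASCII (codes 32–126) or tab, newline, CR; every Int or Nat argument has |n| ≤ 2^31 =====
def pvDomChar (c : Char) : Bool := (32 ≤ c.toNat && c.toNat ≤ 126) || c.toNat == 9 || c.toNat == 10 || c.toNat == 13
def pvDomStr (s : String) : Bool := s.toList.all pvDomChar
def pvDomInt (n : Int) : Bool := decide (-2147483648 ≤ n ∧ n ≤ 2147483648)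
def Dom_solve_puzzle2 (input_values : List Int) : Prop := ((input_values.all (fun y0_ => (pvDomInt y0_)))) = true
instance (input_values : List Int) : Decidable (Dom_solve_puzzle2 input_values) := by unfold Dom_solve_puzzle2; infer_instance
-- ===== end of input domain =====

-- B replaces A's per-number string scan (str(), index loop, str.count scans, int() parses) by
-- one arithmetic divmod pass with a 10-slot digit-count table (a different per-number algorithm).

-- ===== PORT A =====
-- int(ch) is ported as (PySem.Int.ofChars? [ch]).getD 0: the `none` case (ValueError, only
-- reachable for negative num, i.e. a '-' character) is excluded by Pre_; indices i, i+1 are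
-- always in range since i comes from range(len-1).
def solve_puzzle2 (input_values : List Int) : Int :=
  (PySem.List.pyRange (PySem.List.pyGetD input_values 0 0) (PySem.List.pyGetD input_values 1 0) 1).foldl
    (fun solution_counter num =>
      let num_as_string := PySem.Int.toChars num
      let flags := (PySem.List.pyRange 0 (PySem.List.len num_as_string - 1) 1).foldl
        (fun (st : Bool × Bool) i =>
          (if PySem.List.pyGetD num_as_string i ' ' = PySem.List.pyGetD num_as_string (i+1) ' '
              ∧ PySem.Chars.count num_as_string [PySem.List.pyGetD num_as_string i ' '] = 2
           then true else st.1,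
           if (PySem.Int.ofChars? [PySem.List.pyGetD num_as_string i ' ']).getD 0
              > (PySem.Int.ofChars? [PySem.List.pyGetD num_as_string (i+1) ' ']).getD 0
           then false else st.2))
        (false, true)
      if flags.1 && flags.2 then solution_counter + 1 else solution_counter) 0

-- ===== PORT B =====
-- B's while-loop (while n > 0: d = n % 10; …; n //= 10); the fuel argument only makes the
-- loop structural — it is called with fuel = n.toNat, which bounds the iteration count since
-- n strictly decreases (n //= 10) while positive.
def pvDigitScan (fuel : Nat) (n prev : Int) (counts : List Int) (nondec : Bool) : List Int × Bool :=
  match fuel with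
  | 0 => (counts, nondec)
  | fuel + 1 =>
    if 0 < n then
      let d := PySem.Int.mod n 10
      pvDigitScan fuel (PySem.Int.floordiv n 10) d
        (PySem.List.pySetD counts d (PySem.List.pyGetD counts d 0 + 1))
        (if d > prev then false else nondec)
    else (counts, nondec)

def solve_puzzle2_alt (input_values : List Int) : Int :=
  (PySem.List.pyRange (PySem.List.pyGetD input_values 0 0) (PySem.List.pyGetD input_values 1 0) 1).foldl
    (fun total num =>
      let prev := PySem.Int.mod num 10
      let counts := PySem.List.pySetD (List.replicate 10 (0:Int)) prev
        (PySem.List.pyGetD (List.replicate 10 (0:Int)) prev 0 + 1)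
      let n := PySem.Int.floordiv num 10
      let res := pvDigitScan n.toNat n prev counts true
      if res.2 && res.1.contains 2 then total + 1 else total) 0

-- ===== PRECONDITION & SPEC =====
-- Pre_ excludes exactly the inputs where A raises: fewer than two elements (IndexError on
-- input_values[0]/[1]) and a non-empty range starting below 0 (int('-') raises ValueError).
def Pre_solve_puzzle2 (input_values : List Int) : Prop :=
  2 ≤ input_values.length ∧
  (input_values.getD 0 0 < input_values.getD 1 0 → 0 ≤ input_values.getD 0 0)
instance (input_values : List Int) : Decidable (Pre_solve_puzzle2 input_values) := by
  unfold Pre_solve_puzzle2; infer_instance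
def pvWitness_solve_puzzle2 : List Int := [100, 135]

def Spec_solve_puzzle2 (input_values : List Int) (out : Int) : Prop := out = solve_puzzle2_alt input_values
instance (input_values : List Int) (out : Int) : Decidable (Spec_solve_puzzle2 input_values out) := by unfold Spec_solve_puzzle2; infer_instance

-- ===== CLAIM (what is proved, stated in full; the proofs are below) =====
def Claim_equal_solve_puzzle2 : Prop := ∀ (input_values : List Int), Dom_solve_puzzle2 input_values → Pre_solve_puzzle2 input_values → Spec_solve_puzzle2 input_values (solve_puzzle2 input_values)

-- ===== LEMMAS AND PROOFS =====

-- A's two monotone flags: the fold computes (any p, all not-q).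
theorem pv_pairfold (l : List Int) (P Q : Int → Prop) [DecidablePred P] [DecidablePred Q]
    (b1 b2 : Bool) :
    l.foldl (fun (st : Bool × Bool) i =>
        (if P i then true else st.1, if Q i then false else st.2)) (b1, b2)
      = (b1 || l.any (fun i => decide (P i)), b2 && l.all (fun i => !decide (Q i))) := by
  induction l generalizing b1 b2 with
  | nil => simp
  | cons x t ih =>
    simp only [List.foldl_cons, List.any_cons, List.all_cons]
    rw [ih]
    by_cases hP : P x <;> by_cases hQ : Q x <;> simp [hP, hQ]


theorem pv_toDigitsCore_eq (fuel : Nat) :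
    ∀ n l, 0 < n → n < fuel →
      Nat.toDigitsCore 10 fuel n l = ((Nat.digits 10 n).map Nat.digitChar).reverse ++ l := by
  induction fuel with
  | zero => intro n l h1 h2; omega
  | succ fuel ih =>
    intro n l h1 h2
    rw [Nat.toDigitsCore]
    by_cases h : n / 10 = 0
    · rw [if_pos h]
      rw [Nat.digits_def' (by norm_num) h1]
      have hnil : Nat.digits 10 (n / 10) = [] := by rw [h]; simp
      rw [hnil]
      simp
    · rw [if_neg h]
      rw [ih (n / 10) _ (Nat.pos_of_ne_zero h) (by omega)]
      rw [Nat.digits_def' (by norm_num) h1]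
      simp

theorem pv_toChars_eq (m : Nat) (hm : 0 < m) :
    PySem.Int.toChars (m : Int) = ((Nat.digits 10 m).map Nat.digitChar).reverse := by
  rw [PySem.Int.toChars]
  rw [if_neg (by omega)]
  rw [Int.toNat_natCast m, Nat.toDigits]
  rw [pv_toDigitsCore_eq (m+1) m [] hm (by omega)]
  simp

theorem pv_count_go (c : Char) (fuel : Nat) :
    ∀ (l : List Char) (acc : Nat), l.length ≤ fuel →
      PySem.Chars.count.go [c] fuel l acc = acc + l.count c := by
  induction fuel with
  | zero =>
    intro l acc h
    have : l = [] := List.length_eq_zero_iff.mp (by omega)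
    subst this
    rw [PySem.Chars.count.go]
    simp
  | succ fuel ih =>
    intro l acc h
    cases l with
    | nil => rw [PySem.Chars.count.go]; simp; omega
    | cons x t =>
      rw [PySem.Chars.count.go]
      simp only [List.length_cons] at h
      by_cases hx : c = x
      · subst hx
        rw [if_pos (by simp [List.isPrefixOf])]
        simp only [List.length_cons, List.length_nil, Nat.zero_add, List.drop_succ_cons,
          List.drop_zero]
        rw [ih t (acc+1) (by omega)]
        simp
        omega
      · rw [if_neg (by simp [List.isPrefixOf]; intro hb; exact hx hb)]
        rw [ih t acc (by omega)]
        simp [List.count_cons]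
        intro hb
        exact absurd hb.symm hx

theorem pv_count_single (cs : List Char) (c : Char) :
    PySem.Chars.count cs [c] = cs.count c := by
  rw [PySem.Chars.count]
  rw [if_neg (by simp)]
  rw [pv_count_go c cs.length cs 0 le_rfl, Nat.zero_add]

theorem pv_counts_len (ds : List Nat) :
    ∀ (counts : List Int),
      (ds.foldl (fun c d => c.set d (c.getD d 0 + 1)) counts).length = counts.length := by
  induction ds with
  | nil => intro counts; simp
  | cons d t ih =>
    intro counts
    rw [List.foldl_cons, ih]
    simp

theorem pv_counts_foldl (ds : List Nat) :
    ∀ (counts : List Int), (∀ d ∈ ds, d < 10) → counts.length = 10 → ∀ v : Nat, v < 10 →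
      (ds.foldl (fun c d => c.set d (c.getD d 0 + 1)) counts).getD v 0
        = counts.getD v 0 + (ds.count v : Int) := by
  induction ds with
  | nil => intro counts _ _ v _; simp
  | cons d t ih =>
    intro counts hd hl v hv
    have hd10 : d < 10 := hd d (by simp)
    rw [List.foldl_cons]
    rw [ih _ (fun x hx => hd x (by simp [hx])) (by simp [hl]) v hv]
    have hset : (counts.set d (counts.getD d 0 + 1)).getD v 0
        = if d = v then counts.getD d 0 + 1 else counts.getD v 0 := by
      rw [List.getD_eq_getElem _ 0 (by simp [hl]; omega)]
      rw [List.getElem_set]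
      split_ifs with h
      · rfl
      · exact (List.getD_eq_getElem counts 0 (by omega)).symm
    rw [hset, List.count_cons]
    by_cases h : d = v
    · subst h
      simp
      ring
    · simp [h]

theorem pv_contains_iff (l : List Int) (h : l.length = 10) :
    l.contains 2 = true ↔ ∃ v : Nat, v < 10 ∧ l.getD v 0 = 2 := by
  rw [List.contains_iff_mem, List.mem_iff_getElem]
  constructor
  · rintro ⟨i, hi, he⟩
    exact ⟨i, by omega, by rw [List.getD_eq_getElem _ _ hi, he]⟩
  · rintro ⟨v, hv, he⟩
    exact ⟨v, by omega, by rw [← List.getD_eq_getElem _ 0 (by omega), he]⟩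

theorem pv_adj_of_count_two (ds : List Nat) (v : Nat)
    (hc : List.Pairwise (· ≥ ·) ds) (h2 : ds.count v = 2) :
    ∃ j, j + 1 < ds.length ∧ ds.getD j 0 = v ∧ ds.getD (j+1) 0 = v := by
  induction ds with
  | nil => simp at h2
  | cons a t ih =>
    by_cases ha : a = v
    · subst ha
      have h1 : t.count a = 1 := by
        rw [List.count_cons] at h2
        simp at h2
        omega
      have hmem : a ∈ t := List.count_pos_iff.mp (by omega)
      cases t with
      | nil => simp at hmem
      | cons b t' =>
        have hab : a ≥ b := (List.pairwise_cons.mp hc).1 b (by simp)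
        have hb : b = a := by
          rcases List.mem_cons.mp hmem with h | h
          · omega
          · have hba : b ≥ a := (List.pairwise_cons.mp (List.pairwise_cons.mp hc).2).1 a h
            omega
        exact ⟨0, by simp, rfl, by simp [hb]⟩
    · have ht : t.count v = 2 := by
        rw [List.count_cons] at h2
        simp only [beq_iff_eq] at h2
        rw [if_neg ha] at h2
        omega
      obtain ⟨j, hj, hj1, hj2⟩ := ih (List.pairwise_cons.mp hc).2 ht
      exact ⟨j+1, by simp; omega, by simpa using hj1, by simpa using hj2⟩

theorem pv_digitScan_eq (fuel : Nat) :
    ∀ (n prev : Int) (counts : List Int) (nondec : Bool), n.toNat ≤ fuel →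
      pvDigitScan fuel n prev counts nondec =
        ((Nat.digits 10 n.toNat).foldl (fun c d => c.set d (c.getD d 0 + 1)) counts,
         nondec && decide (List.IsChain (· ≥ ·)
           (prev :: (Nat.digits 10 n.toNat).map (fun d => Int.ofNat d)))) := by
  induction fuel with
  | zero =>
    intro n prev counts nondec h
    have : n.toNat = 0 := by omega
    rw [pvDigitScan, this]
    simp
  | succ fuel ih =>
    intro n prev counts nondec h
    rw [pvDigitScan]
    by_cases hn : 0 < n
    · rw [if_pos hn]
      simp only
      have hn' : n = ((n.toNat : Nat) : Int) := by omega
      have hmod : PySem.Int.mod n 10 = ((n.toNat % 10 : Nat) : Int) := by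
        rw [hn']; exact_mod_cast PySem.Int.mod_natCast n.toNat 10
      have hdiv : PySem.Int.floordiv n 10 = ((n.toNat / 10 : Nat) : Int) := by
        rw [hn']; exact_mod_cast PySem.Int.floordiv_natCast n.toNat 10
      have hdigits : Nat.digits 10 n.toNat = n.toNat % 10 :: Nat.digits 10 (n.toNat / 10) :=
        Nat.digits_def' (by norm_num) (by omega)
      rw [hmod, hdiv]
      rw [ih _ _ _ _ (by
        have := Nat.div_lt_self (show 0 < n.toNat by omega) (show (1:Nat) < 10 by norm_num)
        omega)]
      rw [hdigits, Prod.mk.injEq]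
      constructor
      · rw [Int.toNat_natCast, List.foldl_cons]
        congr 1
        rw [PySem.List.pySetD_of_nonneg _ _ (by positivity), PySem.List.pyGetD_natCast,
          Int.toNat_natCast]
      · rw [Int.toNat_natCast, List.map_cons]
        simp only [List.isChain_cons_cons, Int.ofNat_eq_natCast, Bool.decide_and]
        by_cases hgt : ((n.toNat % 10 : Nat) : Int) > prev
        · rw [if_pos hgt,
            show decide (prev ≥ ((n.toNat % 10 : Nat) : Int)) = false from decide_eq_false (by omega)]
          simp
        · rw [if_neg hgt,
            show decide (prev ≥ ((n.toNat % 10 : Nat) : Int)) = true from decide_eq_true (by omega)]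
          simp
    · rw [if_neg hn]
      have : n.toNat = 0 := by omega
      rw [this]
      simp

theorem pv_core (ds : List Nat) (h10 : ∀ d ∈ ds, d < 10) :
    ((∃ j : Nat, j + 1 < ds.length ∧ ds.getD j 0 = ds.getD (j+1) 0 ∧ ds.count (ds.getD j 0) = 2)
      ∧ (∀ j : Nat, j + 1 < ds.length → ds.getD (j+1) 0 ≤ ds.getD j 0))
    ↔ ((∀ j : Nat, j + 1 < ds.length → ds.getD (j+1) 0 ≤ ds.getD j 0)
      ∧ ∃ v : Nat, v < 10 ∧ ds.count v = 2) := by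
  constructor
  · rintro ⟨⟨j, hj, _, hc⟩, hnd⟩
    refine ⟨hnd, ds.getD j 0, h10 _ ?_, hc⟩
    rw [List.getD_eq_getElem _ _ (by omega)]
    exact List.getElem_mem _
  · rintro ⟨hnd, v, _, hc⟩
    have hp : List.Pairwise (· ≥ ·) ds := by
      rw [← List.isChain_iff_pairwise, List.isChain_iff_getElem]
      intro k hk
      have := hnd k hk
      rw [List.getD_eq_getElem _ _ (by omega), List.getD_eq_getElem _ _ (by omega)] at this
      exact this
    obtain ⟨j, hj, h1, h2⟩ := pv_adj_of_count_two ds v hp hc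
    exact ⟨⟨j, hj, by rw [h1, h2], by rw [h1]; exact hc⟩, hnd⟩

theorem pv_count_map_dc (ds : List Nat) (v : Nat) (h10 : ∀ d ∈ ds, d < 10) (hv : v < 10) :
    (ds.map Nat.digitChar).count (Nat.digitChar v) = ds.count v := by
  induction ds with
  | nil => simp
  | cons d t ih =>
    have hd : d < 10 := h10 d (by simp)
    rw [List.map_cons, List.count_cons, List.count_cons,
      ih (fun x hx => h10 x (by simp [hx]))]
    congr 1
    by_cases h : d = v
    · simp [h]
    · have : ¬(Nat.digitChar d = Nat.digitChar v) := by
        intro he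
        exact h (((by decide : ∀ e < 10, ∀ w < 10, (Nat.digitChar e = Nat.digitChar w ↔ e = w)) d hd v hv).mp he)
      simp [h, this]

theorem pv_digitChar_val' : ∀ d < 10, (PySem.Int.ofChars? [Nat.digitChar d]).getD 0 = (d : Int) := by
  decide

theorem pv_rev_get (ds : List Nat) (k : Nat) (hk : k < ds.length) :
    ((ds.map Nat.digitChar).reverse).getD k ' '
      = Nat.digitChar (ds.getD (ds.length - 1 - k) 0) := by
  rw [List.getD_eq_getElem _ _ (by simp; omega), List.getElem_reverse, List.getElem_map]
  simp only [List.length_map]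
  congr 1
  rw [List.getD_eq_getElem _ _ (by omega)]

theorem pv_B_chain (ds : List Nat) :
    List.IsChain (· ≥ ·) (ds.map (fun d => Int.ofNat d))
    ↔ (∀ j : Nat, j + 1 < ds.length → ds.getD (j+1) 0 ≤ ds.getD j 0) := by
  rw [List.isChain_iff_getElem]
  constructor
  · intro h j hj
    have := h j (by simpa using hj)
    simp only [List.getElem_map, Int.ofNat_eq_natCast] at this
    rw [List.getD_eq_getElem _ _ (by omega), List.getD_eq_getElem _ _ (by omega)]
    exact_mod_cast this
  · intro h j hj
    simp only [List.length_map] at hj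
    have := h j hj
    rw [List.getD_eq_getElem _ _ (by omega), List.getD_eq_getElem _ _ (by omega)] at this
    simp only [List.getElem_map, Int.ofNat_eq_natCast]
    exact_mod_cast this

theorem pv_A_nd (ds : List Nat) (h10 : ∀ d ∈ ds, d < 10) :
    (∀ i ∈ PySem.List.pyRange 0 ((((ds.map Nat.digitChar).reverse).length : Int) - 1) 1,
        ¬((PySem.Int.ofChars? [PySem.List.pyGetD ((ds.map Nat.digitChar).reverse) i ' ']).getD 0
          > (PySem.Int.ofChars? [PySem.List.pyGetD ((ds.map Nat.digitChar).reverse) (i+1) ' ']).getD 0))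
    ↔ (∀ j : Nat, j + 1 < ds.length → ds.getD (j+1) 0 ≤ ds.getD j 0) := by
  have hL : ((ds.map Nat.digitChar).reverse).length = ds.length := by simp
  have hmem : ∀ d ∈ ds, d < 10 := h10
  constructor
  · intro h j hj
    have hi : ((ds.length - 2 - j : Nat) : Int) ∈ PySem.List.pyRange 0 ((((ds.map Nat.digitChar).reverse).length : Int) - 1) 1 := by
      rw [PySem.List.mem_pyRange_one, hL]
      omega
    have := h _ hi
    rw [PySem.List.pyGetD_natCast] at this
    rw [show ((ds.length - 2 - j : Nat) : Int) + 1 = ((ds.length - 2 - j + 1 : Nat) : Int) by push_cast; ring] at this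
    rw [PySem.List.pyGetD_natCast] at this
    rw [pv_rev_get ds _ (by omega), pv_rev_get ds _ (by omega)] at this
    rw [show ds.length - 1 - (ds.length - 2 - j) = j + 1 by omega,
        show ds.length - 1 - (ds.length - 2 - j + 1) = j by omega] at this
    rw [pv_digitChar_val' _ (by
          rw [List.getD_eq_getElem _ _ (by omega)]; exact h10 _ (List.getElem_mem _)),
        pv_digitChar_val' _ (by
          rw [List.getD_eq_getElem _ _ (by omega)]; exact h10 _ (List.getElem_mem _))] at this
    omega
  · intro h i hi
    rw [PySem.List.mem_pyRange_one, hL] at hi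
    have hk : i.toNat + 1 < ds.length := by omega
    have hi1 : i + 1 = ((i.toNat + 1 : Nat) : Int) := by omega
    rw [show i = ((i.toNat : Nat) : Int) by omega, PySem.List.pyGetD_natCast, ← show i = ((i.toNat : Nat) : Int) by omega,
      hi1, PySem.List.pyGetD_natCast]
    rw [pv_rev_get ds _ (by omega), pv_rev_get ds _ (by omega)]
    rw [show ds.length - 1 - (i.toNat + 1) = ds.length - 2 - i.toNat by omega]
    have hj : (ds.length - 2 - i.toNat) + 1 < ds.length := by omega
    have := h _ hj
    rw [show ds.length - 2 - i.toNat + 1 = ds.length - 1 - i.toNat by omega] at this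
    rw [pv_digitChar_val' _ (by
          rw [List.getD_eq_getElem _ _ (by omega)]; exact h10 _ (List.getElem_mem _)),
        pv_digitChar_val' _ (by
          rw [List.getD_eq_getElem _ _ (by omega)]; exact h10 _ (List.getElem_mem _))]
    omega

theorem pv_A_adj (ds : List Nat) (h10 : ∀ d ∈ ds, d < 10) :
    (∃ i ∈ PySem.List.pyRange 0 ((((ds.map Nat.digitChar).reverse).length : Int) - 1) 1,
        PySem.List.pyGetD ((ds.map Nat.digitChar).reverse) i ' '
          = PySem.List.pyGetD ((ds.map Nat.digitChar).reverse) (i+1) ' '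
        ∧ PySem.Chars.count ((ds.map Nat.digitChar).reverse)
            [PySem.List.pyGetD ((ds.map Nat.digitChar).reverse) i ' '] = 2)
    ↔ (∃ j : Nat, j + 1 < ds.length ∧ ds.getD j 0 = ds.getD (j+1) 0
        ∧ ds.count (ds.getD j 0) = 2) := by
  have hL : ((ds.map Nat.digitChar).reverse).length = ds.length := by simp
  constructor
  · rintro ⟨i, hi, he, hc⟩
    rw [PySem.List.mem_pyRange_one, hL] at hi
    have hk : i.toNat + 1 < ds.length := by omega
    set j := ds.length - 2 - i.toNat with hjdef
    have hj1 : ds.getD (j+1) 0 < 10 := by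
      rw [List.getD_eq_getElem _ _ (by omega)]; exact h10 _ (List.getElem_mem _)
    have hj0 : ds.getD j 0 < 10 := by
      rw [List.getD_eq_getElem _ _ (by omega)]; exact h10 _ (List.getElem_mem _)
    have heq : ds.getD j 0 = ds.getD (j+1) 0 := by
      rw [show i = ((i.toNat : Nat) : Int) by omega, PySem.List.pyGetD_natCast,
        show ((i.toNat : Nat) : Int) + 1 = ((i.toNat + 1 : Nat) : Int) by push_cast; ring,
        PySem.List.pyGetD_natCast] at he
      rw [pv_rev_get ds _ (by omega), pv_rev_get ds _ (by omega)] at he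
      rw [show ds.length - 1 - i.toNat = j + 1 by omega,
        show ds.length - 1 - (i.toNat + 1) = j by omega] at he
      exact (((by decide : ∀ e < 10, ∀ w < 10, (Nat.digitChar e = Nat.digitChar w ↔ e = w))
        _ hj1 _ hj0).mp he).symm
    refine ⟨j, by omega, heq, ?_⟩
    rw [show i = ((i.toNat : Nat) : Int) by omega, PySem.List.pyGetD_natCast] at hc
    rw [pv_count_single, List.count_reverse] at hc
    rw [pv_rev_get ds _ (by omega), show ds.length - 1 - i.toNat = j + 1 by omega] at hc
    rw [pv_count_map_dc ds _ h10 hj1] at hc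
    rw [heq]
    exact hc
  · rintro ⟨j, hj, he, hc⟩
    refine ⟨((ds.length - 2 - j : Nat) : Int), ?_, ?_, ?_⟩
    · rw [PySem.List.mem_pyRange_one, hL]; omega
    · rw [PySem.List.pyGetD_natCast,
        show ((ds.length - 2 - j : Nat) : Int) + 1 = ((ds.length - 2 - j + 1 : Nat) : Int) by push_cast; ring,
        PySem.List.pyGetD_natCast]
      rw [pv_rev_get ds _ (by omega), pv_rev_get ds _ (by omega)]
      rw [show ds.length - 1 - (ds.length - 2 - j) = j + 1 by omega,
        show ds.length - 1 - (ds.length - 2 - j + 1) = j by omega]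
      rw [he]
    · rw [PySem.List.pyGetD_natCast]
      rw [pv_count_single, List.count_reverse]
      rw [pv_rev_get ds _ (by omega), show ds.length - 1 - (ds.length - 2 - j) = j + 1 by omega]
      have hj1 : ds.getD (j+1) 0 < 10 := by
        rw [List.getD_eq_getElem _ _ (by omega)]; exact h10 _ (List.getElem_mem _)
      rw [pv_count_map_dc ds _ h10 hj1, ← he]
      exact hc

-- ===== VERDICT (by name: the statement is the Claim_ definition above) =====
theorem solve_puzzle2_spec : Claim_equal_solve_puzzle2 := by
  unfold Claim_equal_solve_puzzle2
  intro iv _ hpre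
  unfold Spec_solve_puzzle2 solve_puzzle2 solve_puzzle2_alt
  apply PySem.List.foldl_congr_mem
  intro acc x hx
  have hx0 : 0 ≤ x := by
    rcases PySem.List.mem_pyRange_one.mp hx with ⟨h1, h2⟩
    rw [PySem.List.pyGetD_ofNat'] at h1 h2
    exact le_trans (hpre.2 (lt_of_le_of_lt h1 h2)) h1
  dsimp only
  rw [show x = ((x.toNat : Nat) : Int) by omega]
  generalize x.toNat = m
  congr 1
  rw [eq_iff_iff]
  by_cases hm : m = 0
  · subst hm; decide
  · have hm0 : 0 < m := Nat.pos_of_ne_zero hm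
    have hds10 : ∀ d ∈ Nat.digits 10 m, d < 10 :=
      fun d hd => Nat.digits_lt_base (by norm_num) hd
    rw [pv_pairfold]
    simp only [Bool.false_or, Bool.true_and, Bool.and_eq_true, List.any_eq_true,
      List.all_eq_true, decide_eq_true_iff, Bool.not_eq_eq_eq_not, Bool.not_true,
      decide_eq_false_iff_not]
    rw [PySem.List.len_eq, pv_toChars_eq m hm0]
    rw [pv_A_adj _ hds10, pv_A_nd _ hds10]
    have hdiv : PySem.Int.floordiv ((m:Nat):Int) 10 = ((m/10 : Nat) : Int) := by
      exact_mod_cast PySem.Int.floordiv_natCast m 10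
    have hmod : PySem.Int.mod ((m:Nat):Int) 10 = ((m % 10 : Nat) : Int) := by
      exact_mod_cast PySem.Int.mod_natCast m 10
    rw [hdiv, hmod, PySem.List.pySetD_of_nonneg _ _ (by positivity), PySem.List.pyGetD_natCast]
    simp only [Int.toNat_natCast]
    rw [pv_digitScan_eq (m/10) ((m/10 : Nat) : Int) _ _ _ (by rw [Int.toNat_natCast])]
    simp only [Int.toNat_natCast]
    rw [Bool.true_and, decide_eq_true_iff]
    rw [show ((m % 10 : Nat) : Int) :: List.map (fun d => Int.ofNat d) (Nat.digits 10 (m/10))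
        = List.map (fun d => Int.ofNat d) (Nat.digits 10 m) from by
      rw [Nat.digits_def' (by norm_num) hm0, List.map_cons, Int.ofNat_eq_natCast]]
    rw [pv_B_chain]
    rw [pv_contains_iff _ (by rw [pv_counts_len]; simp)]
    have hcnt : ∀ v : Nat, v < 10 →
        ((Nat.digits 10 (m/10)).foldl (fun c d => c.set d (c.getD d 0 + 1))
          ((List.replicate 10 (0:Int)).set (m % 10)
            ((List.replicate 10 (0:Int)).getD (m % 10) 0 + 1))).getD v 0
          = ((Nat.digits 10 m).count v : Int) := by
      intro v hv
      rw [pv_counts_foldl _ _ (fun d hd => Nat.digits_lt_base (by norm_num) hd) (by simp) v hv]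
      rw [Nat.digits_def' (by norm_num) hm0, List.count_cons]
      have hset : ((List.replicate 10 (0:Int)).set (m % 10)
          ((List.replicate 10 (0:Int)).getD (m % 10) 0 + 1)).getD v 0
            = if m % 10 = v then 1 else 0 := by
        rw [List.getD_eq_getElem _ _ (by simp; omega), List.getElem_set]
        split_ifs with h
        · rw [List.getD_eq_getElem _ _ (by simp; omega), List.getElem_replicate]
          norm_num
        · rw [List.getElem_replicate]
      rw [hset]
      simp only [beq_iff_eq]
      by_cases h : m % 10 = v
      · simp only [if_pos h]
        push_cast
        ring
      · simp only [if_neg h]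
        push_cast
        ring
    have hmemiff : (∃ v : Nat, v < 10 ∧
        ((Nat.digits 10 (m/10)).foldl (fun c d => c.set d (c.getD d 0 + 1))
          ((List.replicate 10 (0:Int)).set (m % 10)
            ((List.replicate 10 (0:Int)).getD (m % 10) 0 + 1))).getD v 0 = 2)
        ↔ (∃ v : Nat, v < 10 ∧ (Nat.digits 10 m).count v = 2) := by
      constructor
      · rintro ⟨v, hv, he⟩
        rw [hcnt v hv] at he
        exact ⟨v, hv, by exact_mod_cast he⟩
      · rintro ⟨v, hv, he⟩
        exact ⟨v, hv, by rw [hcnt v hv]; exact_mod_cast he⟩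
    rw [hmemiff]
    exact pv_core _ hds10
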